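-- pv_equiv track=rewrite | github.com/weiliping/codingbasics | src/main/py/interviewbit/Stacks_and_Queues/sortedSum.py | sortedSumII
-- ===== SOURCE A (Python) =====
-- def sortedSumII(a):
--     ans = 0
--     while a:
--         def temp(l):
--             l.sort()
--             ansi = 0
--             for j in range(0, len(l)):
--                 ansi = ansi+(j+1)*l[j]
--             return ansi
--         ans = ans+temp(a.copy())
--         a.pop()
--     return ans % ((10**9)+7)
-- ===== SOURCE B (Python) =====
-- def sortedSumII(a):
--     MOD = 10**9 + 7
--     ans = 0
--     s = 0          # weighted sorted sum of the current prefix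
--     seen = []
--     for x in a:
--         c = 0      # elements already seen that are < x
--         t = 0      # sum of elements already seen that are >= x
--         for y in seen:
--             if y < x:
--                 c += 1
--             else:
--                 t += y
--         s += (c + 1) * x + t
--         ans += s
--         seen.append(x)
--     return ans % MOD
-- ===== Notes on version B (the rewrite author's own statement) =====
-- stated objective: faster
-- what changed: Instead of re-sorting every prefix and recomputing its rank-weighted sum from scratch, B maintains the weighted sorted sum incrementally: appending x adds (c+1)*x + t where c counts earlier elements < x and t sums earlier elements >= x, so no sorting happens at all.
import Mathlib
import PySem

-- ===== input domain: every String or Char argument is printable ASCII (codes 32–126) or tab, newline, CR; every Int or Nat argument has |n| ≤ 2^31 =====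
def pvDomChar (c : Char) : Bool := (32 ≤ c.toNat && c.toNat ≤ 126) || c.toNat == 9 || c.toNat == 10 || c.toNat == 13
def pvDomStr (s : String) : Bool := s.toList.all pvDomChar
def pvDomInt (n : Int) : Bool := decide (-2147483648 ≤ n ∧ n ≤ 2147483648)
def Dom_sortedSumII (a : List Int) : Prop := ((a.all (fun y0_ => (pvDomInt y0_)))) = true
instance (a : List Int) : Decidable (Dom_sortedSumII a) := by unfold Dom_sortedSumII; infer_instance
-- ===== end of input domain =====

-- B replaces A's re-sort of every prefix by an incremental update of the weighted sorted sum
-- (objective: faster). Equivalence is about the RETURN value only: Python A empties its argument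
-- list by popping; B does not mutate it.

-- ===== PORT A =====
-- temp(l): l.sort(); ansi = Σ (j+1)*l[j]
def tempA (l : List Int) : Int :=
  let s := PySem.List.sorted l (fun x => x) false
  (PySem.List.pyRange 0 (s.length : Int) 1).foldl
    (fun ansi j => ansi + (j + 1) * PySem.List.pyGetD s j 0) 0

-- while a: ans = ans + temp(a.copy()); a.pop()
def loopA : List Int → Int → Int
  | [], ans => ans
  | x :: t, ans => loopA (x :: t).dropLast (ans + tempA (x :: t))
termination_by a => a.length
decreasing_by simp [List.length_dropLast]

def sortedSumII (a : List Int) : Int :=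
  PySem.Int.mod (loopA a 0) (10 ^ 9 + 7)

-- ===== PORT B =====
-- inner 'for y in seen' loop of Source B, accumulating (c, t)
def scanB (x : Int) (seen : List Int) : Int × Int :=
  seen.foldl (fun p y => if y < x then (p.1 + 1, p.2) else (p.1, p.2 + y)) (0, 0)

-- outer 'for x in a' loop of Source B, state (ans, s, seen)
def loopB : List Int → Int → Int → List Int → Int
  | [], ans, _, _ => ans
  | x :: rest, ans, s, seen =>
      let ct := scanB x seen
      let s' := s + (ct.1 + 1) * x + ct.2
      loopB rest (ans + s') s' (seen ++ [x])

def sortedSumII_alt (a : List Int) : Int :=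
  PySem.Int.mod (loopB a 0 0 []) (10 ^ 9 + 7)

-- ===== PRECONDITION & SPEC =====
def Spec_sortedSumII (a : List Int) (out : Int) : Prop := out = sortedSumII_alt a
instance (a : List Int) (out : Int) : Decidable (Spec_sortedSumII a out) := by unfold Spec_sortedSumII; infer_instance

-- ===== CLAIM (what is proved, stated in full; the proofs are below) =====
def Claim_equal_sortedSumII : Prop := ∀ (a : List Int), Dom_sortedSumII a → Spec_sortedSumII a (sortedSumII a)

-- ===== LEMMAS AND PROOFS =====

-- weighted sum with weights k, k+1, …
def ws : List Int → Int → Int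
  | [], _ => 0
  | y :: t, k => k * y + ws t (k + 1)

-- W l = the rank-weighted sum of sorted(l)
def W (l : List Int) : Int := ws (PySem.List.sorted l (fun x => x) false) 1

lemma ws_append (u v : List Int) (k : Int) :
    ws (u ++ v) k = ws u k + ws v (k + u.length) := by
  induction u generalizing k with
  | nil => simp [ws]
  | cons y t ih =>
      simp only [List.cons_append, ws, ih, List.length_cons]
      push_cast
      ring_nf

lemma ws_shift (l : List Int) (k : Int) :
    ws l (k + 1) = ws l k + l.sum := by
  induction l generalizing k with
  | nil => simp [ws]
  | cons y t ih => simp [ws, ih]; ring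

-- tempA computes ws (sorted l) 1
lemma tempA_eq_W (l : List Int) : tempA l = W l := by
  unfold tempA W
  generalize PySem.List.sorted l (fun x => x) false = s
  suffices h : ∀ (s : List Int) (acc : Int),
      (PySem.List.pyRange 0 (s.length : Int) 1).foldl
        (fun ansi j => ansi + (j + 1) * PySem.List.pyGetD s j 0) acc = acc + ws s 1 by
    simpa using h s 0
  intro s acc
  induction s using List.reverseRecOn generalizing acc with
  | nil => simp [ws, PySem.List.pyRange]
  | append_singleton t x ih =>
      have hlen : ((t ++ [x]).length : Int) = (t.length : Int) + 1 := by
        simp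
      rw [hlen, PySem.List.pyRange_one_succ_right (a := 0) (b := (t.length : Int)) (by positivity),
        List.foldl_append]
      have hcongr : (PySem.List.pyRange 0 (t.length : Int) 1).foldl
          (fun ansi j => ansi + (j + 1) * PySem.List.pyGetD (t ++ [x]) j 0) acc
          = (PySem.List.pyRange 0 (t.length : Int) 1).foldl
          (fun ansi j => ansi + (j + 1) * PySem.List.pyGetD t j 0) acc := by
        apply PySem.List.foldl_congr_mem
        intro b j hj
        have := PySem.List.mem_pyRange_one.mp hj
        have hj0 : 0 ≤ j := this.1
        obtain ⟨n, rfl⟩ := Int.eq_ofNat_of_zero_le hj0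
        have hn : n < t.length := by exact_mod_cast this.2
        rw [PySem.List.pyGetD_natCast, PySem.List.pyGetD_natCast]
        simp [List.getElem?_append_left hn]
      rw [hcongr, ih]
      have hget : PySem.List.pyGetD (t ++ [x]) (t.length : Int) 0 = x := by
        rw [PySem.List.pyGetD_natCast]
        simp
      rw [List.foldl_cons, hget, ws_append]
      simp [ws]; ring

-- on a ≤-sorted list, takeWhile (< x) is filter (< x)
lemma takeWhile_eq_filter_of_sorted (x : Int) :
    ∀ (l : List Int), l.Pairwise (· ≤ ·) →
      l.takeWhile (fun y => decide (y < x)) = l.filter (fun y => decide (y < x)) := by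
  intro l hl
  induction l with
  | nil => rfl
  | cons y t ih =>
      rcases List.pairwise_cons.mp hl with ⟨hy, ht⟩
      by_cases h : y < x
      · simp [h, ih ht]
      · have : t.filter (fun y => decide (y < x)) = [] := by
          apply List.filter_eq_nil_iff.mpr
          intro z hz
          simp only [decide_eq_true_eq]
          exact fun hzx => h (lt_of_le_of_lt (hy z hz) hzx)
        simp [h, this]

-- on a ≤-sorted list, dropWhile (< x) is filter (¬ < x)
lemma dropWhile_eq_filter_of_sorted (x : Int) :
    ∀ (l : List Int), l.Pairwise (· ≤ ·) →
      l.dropWhile (fun y => decide (y < x)) = l.filter (fun y => !decide (y < x)) := by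
  intro l hl
  induction l with
  | nil => rfl
  | cons y t ih =>
      rcases List.pairwise_cons.mp hl with ⟨hy, ht⟩
      by_cases h : y < x
      · simp [h, ih ht]
      · have : t.filter (fun y => !decide (y < x)) = t := by
          apply List.filter_eq_self.mpr
          intro z hz
          simp only [Bool.not_eq_eq_eq_not, Bool.not_true, decide_eq_false_iff_not]
          exact fun hzx => h (lt_of_le_of_lt (hy z hz) hzx)
        simp [h, this]

-- the incremental step: appending x adds (c+1)*x + t to the weighted sorted sum
lemma W_snoc (p : List Int) (x : Int) :
    W (p ++ [x]) = W p + (((p.filter (fun y => decide (y < x))).length : Int) + 1) * x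
      + (p.filter (fun y => !decide (y < x))).sum := by
  have hs := PySem.List.sorted_pairwise (xs := p) (key := fun x => x)
  set s := PySem.List.sorted p (fun x => x) false with hsdef
  set l1 := s.takeWhile (fun y => decide (y < x)) with hl1
  set l2 := s.dropWhile (fun y => decide (y < x)) with hl2
  have hsplit : l1 ++ l2 = s := List.takeWhile_append_dropWhile
  have hperm : s.Perm p := PySem.List.sorted_perm p (fun x => x) false
  -- sorted (p ++ [x]) = l1 ++ x :: l2
  have hsorted : PySem.List.sorted (p ++ [x]) (fun x => x) false = l1 ++ x :: l2 := by
    apply PySem.List.sorted_id_eq_of_perm_of_pairwise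
    · calc (l1 ++ x :: l2).Perm ((l1 ++ l2) ++ [x]) := by
            simpa using (List.perm_append_comm (l₁ := [x]) (l₂ := l2)).append_left l1
         _ = s ++ [x] := by rw [hsplit]
         _ |>.Perm (p ++ [x]) := hperm.append_right [x]
    · rw [List.pairwise_append]
      refine ⟨List.Pairwise.sublist (List.takeWhile_sublist _) hs, ?_, ?_⟩
      · rw [List.pairwise_cons]
        constructor
        · -- every element of l2 satisfies x ≤ ·
          intro z hz
          rw [hl2, dropWhile_eq_filter_of_sorted x s hs] at hz
          rcases List.mem_filter.mp hz with ⟨_, hzb⟩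
          simp only [Bool.not_eq_eq_eq_not, Bool.not_true, decide_eq_false_iff_not] at hzb
          omega
        · exact List.Pairwise.sublist (List.dropWhile_sublist _) hs
      · intro z hz w hw
        have hz' : z < x := by
          have := List.mem_takeWhile_imp (hl1 ▸ hz)
          simpa using this
        rcases List.mem_cons.mp hw with rfl | hw'
        · exact le_of_lt hz'
        · have : x ≤ w := by
            rw [hl2, dropWhile_eq_filter_of_sorted x s hs] at hw'
            rcases List.mem_filter.mp hw' with ⟨_, hwb⟩
            simp only [Bool.not_eq_eq_eq_not, Bool.not_true, decide_eq_false_iff_not] at hwb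
            omega
          omega
  have hc : l1.length = (p.filter (fun y => decide (y < x))).length := by
    rw [hl1, takeWhile_eq_filter_of_sorted x s hs]
    exact (hperm.filter _).length_eq
  have ht : l2.sum = (p.filter (fun y => !decide (y < x))).sum := by
    rw [hl2, dropWhile_eq_filter_of_sorted x s hs]
    exact (hperm.filter _).sum_eq
  unfold W
  rw [hsorted, ws_append]
  have hW : ws s 1 = ws l1 1 + ws l2 (1 + l1.length) := by
    rw [← hsplit, ws_append]
  rw [hsdef] at hW
  rw [hW]
  have : ws (x :: l2) (1 + (l1.length : Int)) =
      (1 + (l1.length : Int)) * x + ws l2 (1 + l1.length) + l2.sum := by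
    show (1 + (l1.length : Int)) * x + ws l2 (1 + (l1.length : Int) + 1) = _
    rw [ws_shift]
    ring
  rw [this, hc, ht]
  ring

-- scanB computes (count of elements < x, sum of elements ≥ x)
lemma scanB_eq (x : Int) (seen : List Int) :
    scanB x seen = (((seen.filter (fun y => decide (y < x))).length : Int),
      (seen.filter (fun y => !decide (y < x))).sum) := by
  unfold scanB
  suffices h : ∀ (l : List Int) (c t : Int),
      l.foldl (fun p y => if y < x then (p.1 + 1, p.2) else (p.1, p.2 + y)) (c, t)
        = (c + ((l.filter (fun y => decide (y < x))).length : Int),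
           t + (l.filter (fun y => !decide (y < x))).sum) by
    simpa using h seen 0 0
  intro l
  induction l with
  | nil => intro c t; simp
  | cons y tl ih =>
      intro c t
      by_cases h : y < x
      · simp only [List.foldl_cons, h, if_pos, List.filter_cons, decide_eq_true_eq]
        rw [ih]
        simp
        ring
      · simp only [List.foldl_cons, h, if_neg, not_false_iff, List.filter_cons]
        rw [ih]
        simp
        ring

-- the sum of W over all prefixes seen ++ (take k rest), k = 1 .. |rest|
def sumPref : List Int → List Int → Int
  | _, [] => 0
  | seen, x :: rest => W (seen ++ [x]) + sumPref (seen ++ [x]) rest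

lemma loopB_eq (rest : List Int) :
    ∀ (ans : Int) (seen : List Int), loopB rest ans (W seen) seen = ans + sumPref seen rest := by
  induction rest with
  | nil => intro ans seen; simp [loopB, sumPref]
  | cons x r ih =>
      intro ans seen
      show loopB (x :: r) ans (W seen) seen = _
      rw [loopB, sumPref]
      have hs : W seen + ((scanB x seen).1 + 1) * x + (scanB x seen).2 = W (seen ++ [x]) := by
        rw [scanB_eq, W_snoc]
      simp only [hs]
      rw [ih]
      ring

lemma sumPref_snoc (rest : List Int) :
    ∀ (seen : List Int) (x : Int),
      sumPref seen (rest ++ [x]) = sumPref seen rest + W (seen ++ rest ++ [x]) := by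
  induction rest with
  | nil => intro seen x; simp [sumPref]
  | cons y r ih =>
      intro seen x
      show W (seen ++ [y]) + sumPref (seen ++ [y]) (r ++ [x]) = _
      rw [ih, sumPref]
      simp only [List.append_assoc, List.cons_append, List.nil_append]
      ring

lemma loopA_eq (a : List Int) :
    ∀ (ans : Int), loopA a ans = ans + sumPref [] a := by
  induction a using List.reverseRecOn with
  | nil => intro ans; simp [loopA, sumPref]
  | append_singleton p x ih =>
      intro ans
      have hne : p ++ [x] ≠ [] := by simp
      rw [show loopA (p ++ [x]) ans
            = loopA (p ++ [x]).dropLast (ans + tempA (p ++ [x])) from by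
          cases h : p ++ [x] with
          | nil => exact absurd h hne
          | cons y t => rw [loopA]]
      rw [List.dropLast_concat, ih, sumPref_snoc, tempA_eq_W]
      simp; ring

-- ===== VERDICT (by name: the statement is the Claim_ definition above) =====
theorem sortedSumII_spec : Claim_equal_sortedSumII := by
  intro a _
  show sortedSumII a = sortedSumII_alt a
  unfold sortedSumII sortedSumII_alt
  congr 1
  have hb : loopB a 0 0 [] = 0 + sumPref [] a := by
    have := loopB_eq a 0 []
    simpa [W, PySem.List.sorted, ws] using this
  rw [loopA_eq, hb]
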